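-- pv_equiv track=rewrite | github.com/MUN-WNC-LAB/QuickP | optimizer/optimization_problems/gurobi_util.py | get_subgraph_topo_dict
-- ===== SOURCE A (Python) =====
-- def get_subgraph_topo_dict(original_topo_list, partition_dict) -> dict[int, list]:
--     subgraph_topo_dict = {}
--     for node in original_topo_list:
--         subgraph_id = partition_dict[node]
--         if subgraph_id not in subgraph_topo_dict.keys():
--             subgraph_topo_dict[subgraph_id] = []
--         subgraph_topo_dict[subgraph_id].append(node)
--
--     return subgraph_topo_dict
-- ===== SOURCE B (Python) =====
-- def get_subgraph_topo_dict(original_topo_list, partition_dict) -> dict[int, list]: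
--     ids = list(dict.fromkeys(partition_dict[node] for node in original_topo_list))
--     return {sid: [node for node in original_topo_list if partition_dict[node] == sid]
--             for sid in ids}
-- ===== Notes on version B (the rewrite author's own statement) =====
-- stated objective: alternative
-- what changed: Replaces the single incremental grouping pass (conditional key creation + append into a mutable dict) by a two-phase scheme: first collect the distinct partition ids in first-appearance order with dict.fromkeys, then build each group in one comprehension as a filter of the topo list.
import Mathlib
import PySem

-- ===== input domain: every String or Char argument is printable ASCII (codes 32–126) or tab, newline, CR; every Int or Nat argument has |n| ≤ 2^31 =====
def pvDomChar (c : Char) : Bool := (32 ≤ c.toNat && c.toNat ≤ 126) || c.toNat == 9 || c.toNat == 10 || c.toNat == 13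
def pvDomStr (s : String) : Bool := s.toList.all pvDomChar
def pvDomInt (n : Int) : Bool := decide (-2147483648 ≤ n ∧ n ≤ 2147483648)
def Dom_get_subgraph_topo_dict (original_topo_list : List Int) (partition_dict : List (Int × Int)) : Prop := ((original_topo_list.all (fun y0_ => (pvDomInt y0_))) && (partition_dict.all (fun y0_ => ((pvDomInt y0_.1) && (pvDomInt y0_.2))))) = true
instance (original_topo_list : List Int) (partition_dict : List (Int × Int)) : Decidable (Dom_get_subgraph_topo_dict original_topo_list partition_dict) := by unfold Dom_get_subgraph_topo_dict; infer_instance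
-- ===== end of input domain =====

-- ===== PORT A =====
-- B differs only in decomposition (same results, same order); no speed claim is made.
-- A raises KeyError when a node of the topo list is missing from partition_dict; Pre_ excludes that.
-- partition_dict[node]; the default 0 is never used under Pre_ (the key is present)
def pvLookupA (partition_dict : List (Int × Int)) (node : Int) : Int :=
  PySem.Dict.getD (PySem.Dict.mk partition_dict) node 0

def get_subgraph_topo_dict (original_topo_list : List Int) (partition_dict : List (Int × Int)) : List (Int × List Int) :=
  (original_topo_list.foldl (fun subgraph_topo_dict node =>
      let subgraph_id := pvLookupA partition_dict node
      let subgraph_topo_dict :=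
        if subgraph_id ∈ subgraph_topo_dict.keys then subgraph_topo_dict
        else subgraph_topo_dict.insert subgraph_id []
      -- subgraph_topo_dict[subgraph_id].append(node): in-place append at an existing key
      subgraph_topo_dict.modify subgraph_id [] (fun l => l ++ [node]))
    PySem.Dict.empty).items

-- ===== PORT B =====
def get_subgraph_topo_dict_alt (original_topo_list : List Int) (partition_dict : List (Int × Int)) : List (Int × List Int) :=
  let ids := PySem.List.dedup (original_topo_list.map (fun node => pvLookupA partition_dict node))
  ids.map (fun sid => (sid, original_topo_list.filter (fun node => pvLookupA partition_dict node == sid)))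

-- ===== PRECONDITION & SPEC =====
-- Pre_ excludes exactly the inputs where A raises KeyError: a node without an entry in partition_dict.
def Pre_get_subgraph_topo_dict (original_topo_list : List Int) (partition_dict : List (Int × Int)) : Prop :=
  ∀ node ∈ original_topo_list, (PySem.Dict.mk partition_dict).contains node = true
instance (original_topo_list : List Int) (partition_dict : List (Int × Int)) : Decidable (Pre_get_subgraph_topo_dict original_topo_list partition_dict) := by unfold Pre_get_subgraph_topo_dict; infer_instance

def pvWitness_get_subgraph_topo_dict : List Int × (List (Int × Int)) := ([0, 1, 2, 1], [(0, 5), (1, 7), (2, 5)])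

def Spec_get_subgraph_topo_dict (original_topo_list : List Int) (partition_dict : List (Int × Int)) (out : List (Int × List Int)) : Prop := out = get_subgraph_topo_dict_alt original_topo_list partition_dict
instance (original_topo_list : List Int) (partition_dict : List (Int × Int)) (out : List (Int × List Int)) : Decidable (Spec_get_subgraph_topo_dict original_topo_list partition_dict out) := by unfold Spec_get_subgraph_topo_dict; infer_instance

-- ===== CLAIM (what is proved, stated in full; the proofs are below) =====
def Claim_equal_get_subgraph_topo_dict : Prop := ∀ (original_topo_list : List Int) (partition_dict : List (Int × Int)), Dom_get_subgraph_topo_dict original_topo_list partition_dict → Pre_get_subgraph_topo_dict original_topo_list partition_dict → Spec_get_subgraph_topo_dict original_topo_list partition_dict (get_subgraph_topo_dict original_topo_list partition_dict)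

-- ===== LEMMAS AND PROOFS =====
-- A's loop body (conditional fresh insert, then in-place append) equals a single Dict.modify.
theorem pvStep_eq_modify (d : PySem.Dict Int (List Int)) (sid node : Int) :
    (if sid ∈ d.keys then d else d.insert sid []).modify sid [] (fun l => l ++ [node])
      = d.modify sid [] (fun l => l ++ [node]) := by
  by_cases h : sid ∈ d.keys
  · simp [h]
  · have hc : d.contains sid = false := by
      rw [PySem.Dict.contains_eq_decide_mem_keys]; simp [h]
    simp only [h, if_false, PySem.Dict.modify]
    rw [PySem.Dict.getD_insert_self, PySem.Dict.insert_insert_self,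
        PySem.Dict.getD_of_not_contains d [] hc]

-- the whole loop written as modify over the (partition id, node) pairs
theorem pvLoop_eq_modify (original_topo_list : List Int) (partition_dict : List (Int × Int)) :
    (original_topo_list.foldl (fun subgraph_topo_dict node =>
        let subgraph_id := pvLookupA partition_dict node
        let subgraph_topo_dict :=
          if subgraph_id ∈ subgraph_topo_dict.keys then subgraph_topo_dict
          else subgraph_topo_dict.insert subgraph_id []
        subgraph_topo_dict.modify subgraph_id [] (fun l => l ++ [node]))
      PySem.Dict.empty)
    = original_topo_list.foldl
        (fun d node => d.modify (pvLookupA partition_dict node) [] (fun l => l ++ [node]))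
        PySem.Dict.empty := by
  congr 1
  funext d node
  exact pvStep_eq_modify d (pvLookupA partition_dict node) node

-- ===== VERDICT (by name: the statement is the Claim_ definition above) =====
theorem get_subgraph_topo_dict_spec : Claim_equal_get_subgraph_topo_dict := by
  intro otl pd _ _
  unfold Spec_get_subgraph_topo_dict get_subgraph_topo_dict get_subgraph_topo_dict_alt
  rw [pvLoop_eq_modify]
  set f : Int → Int := fun node => pvLookupA pd node with hf
  set D := otl.foldl (fun d node => d.modify (f node) [] (fun l => l ++ [node])) PySem.Dict.empty with hD
  have hkeys : D.keys = PySem.List.dedup (otl.map f) := by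
    rw [hD, PySem.Dict.keys_foldl_modify_key otl f [] (fun _ node => fun l => l ++ [node])]
    simp [PySem.Set.update, PySem.Set.ofList_eq_foldl, PySem.Dict.keys_empty]
  have hnodup : D.keys.Nodup := by
    rw [hD]
    exact PySem.Dict.nodup_keys_foldl_modify_key otl f [] _ _ (by simp [PySem.Dict.keys_empty])
  have hgetD : ∀ c : Int, D.getD c [] = otl.filter (fun node => f node == c) := by
    intro c
    have : D = (otl.map (fun n => (f n, n))).foldl
        (fun d p => d.modify p.1 [] (fun l => l ++ [p.2])) PySem.Dict.empty := by
      rw [hD, List.foldl_map]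
    rw [this, PySem.Dict.getD_foldl_modify_append]
    simp [PySem.Dict.getD_empty, List.filter_map, Function.comp_def]
  rw [PySem.Dict.items_eq_map_keys D hnodup [], hkeys]
  simp only [List.map_inj_left]
  intro sid _
  rw [hgetD sid]
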